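-- pv_equiv track=rewrite | github.com/kakio426/eduitit | mancala/engine.py | sow_path
-- ===== SOURCE A (Python) =====
-- P0_STORE = 7
--
-- P1_STORE = 0
--
-- def sow_path(board, action, player):
--     seeds = int(board[action])
--     if seeds <= 0:
--         return []
--
--     destinations = []
--     index = action
--     for _ in range(seeds):
--         index = _next_sow_index(index, player)
--         destinations.append(index)
--     return destinations
--
-- def _next_sow_index(index, player):
--     index = (index + 1) % 14
--     opponent_store = P1_STORE if player == 0 else P0_STORE
--     if index == opponent_store:
--         index = (index + 1) % 14
--     return index
-- ===== SOURCE B (Python) =====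
-- def sow_path(board, action, player):
--     seeds = int(board[action])
--     if seeds <= 0:
--         return []
--     opponent_store = 0 if player == 0 else 7
--     allowed = [i for i in range(14) if i != opponent_store]
--     m = action % 14
--     r0 = (m + 1) - (1 if opponent_store <= m else 0)
--     return [allowed[(r0 + k) % 13] for k in range(seeds)]
-- ===== Notes on version B (the rewrite author's own statement) =====
-- stated objective: alternative
-- what changed: Replaced A's per-seed conditional stepping (increment mod 14, skip the opponent store each step) by precomputing the ring of the 13 allowed landing cells once and reading each destination with a single modular index into it.
import Mathlib
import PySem

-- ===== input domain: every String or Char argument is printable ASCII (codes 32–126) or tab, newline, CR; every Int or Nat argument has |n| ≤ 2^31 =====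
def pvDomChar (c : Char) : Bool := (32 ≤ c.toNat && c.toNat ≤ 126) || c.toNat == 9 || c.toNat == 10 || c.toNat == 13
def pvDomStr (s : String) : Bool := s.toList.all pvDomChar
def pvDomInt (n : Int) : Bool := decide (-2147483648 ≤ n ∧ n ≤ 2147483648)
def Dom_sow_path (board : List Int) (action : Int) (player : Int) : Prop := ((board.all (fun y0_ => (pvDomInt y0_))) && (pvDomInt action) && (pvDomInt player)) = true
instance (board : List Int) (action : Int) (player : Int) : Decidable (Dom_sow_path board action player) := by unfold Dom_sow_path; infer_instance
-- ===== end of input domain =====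

-- B replaces A's per-seed conditional stepping by a single modular lookup into the
-- precomputed ring of the 13 allowed landing cells (alternative decomposition).

-- ===== PORT A =====
-- helper: literal transliteration of _next_sow_index
def nextSowIndex (index : Int) (player : Int) : Int :=
  let index := PySem.Int.mod (index + 1) 14
  let opponent_store : Int := if player == 0 then 0 else 7
  if index == opponent_store then PySem.Int.mod (index + 1) 14 else index

def sow_path (board : List Int) (action : Int) (player : Int) : List Int :=
  match PySem.List.pyGet? board action with
  | none => []            -- IndexError in Python; excluded by Pre_
  | some seeds =>
    if seeds ≤ 0 then []
    else
      -- for _ in range(seeds): index = _next_sow_index(index, player); destinations.append(index)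
      ((List.range seeds.toNat).foldl
        (fun (st : List Int × Int) _ =>
          let i := nextSowIndex st.2 player
          (st.1 ++ [i], i)) ([], action)).1

-- ===== PORT B =====
def sow_path_alt (board : List Int) (action : Int) (player : Int) : List Int :=
  match PySem.List.pyGet? board action with
  | none => []            -- IndexError in Python; excluded by Pre_
  | some seeds =>
    if seeds ≤ 0 then []
    else
      let opponent_store : Int := if player == 0 then 0 else 7
      let allowed : List Int :=
        ((List.range 14).map (fun i : Nat => (i : Int))).filter (fun i => i ≠ opponent_store)
      let m := PySem.Int.mod action 14
      let r0 := (m + 1) - (if opponent_store ≤ m then 1 else 0)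
      (List.range seeds.toNat).map (fun k : Nat =>
        PySem.List.pyGetD allowed (PySem.Int.mod (r0 + (k : Int)) 13) 0)

-- ===== PRECONDITION & SPEC =====
-- Pre_ excludes exactly the inputs where board[action] raises IndexError in Python.
def Pre_sow_path (board : List Int) (action : Int) (player : Int) : Prop :=
  PySem.Raise.InRange board.length action
instance (board : List Int) (action : Int) (player : Int) : Decidable (Pre_sow_path board action player) := by unfold Pre_sow_path; infer_instance

def pvWitness_sow_path : List Int × Int × Int := ([4, 1, 0, 2, 3, 1, 2, 0, 1, 3, 2, 1, 0, 2], 0, 0)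

def Spec_sow_path (board : List Int) (action : Int) (player : Int) (out : List Int) : Prop := out = sow_path_alt board action player
instance (board : List Int) (action : Int) (player : Int) (out : List Int) : Decidable (Spec_sow_path board action player out) := by unfold Spec_sow_path; infer_instance

-- ===== CLAIM (what is proved, stated in full; the proofs are below) =====
def Claim_equal_sow_path : Prop := ∀ (board : List Int) (action : Int) (player : Int), Dom_sow_path board action player → Pre_sow_path board action player → Spec_sow_path board action player (sow_path board action player)

-- ===== LEMMAS AND PROOFS =====

/-- A's step, phrased over the opponent store directly. -/
def ringNext (opp i : Int) : Int :=
  let j := PySem.Int.mod (i + 1) 14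
  if j == opp then PySem.Int.mod (j + 1) 14 else j

/-- the list of allowed landing cells used by B -/
def allowedOf (opp : Int) : List Int :=
  ((List.range 14).map (fun i : Nat => (i : Int))).filter (fun i => i ≠ opp)

theorem nextSowIndex_eq_ringNext (i player : Int) :
    nextSowIndex i player = ringNext (if player == 0 then 0 else 7) i := rfl

theorem ringNext_mod (opp i : Int) :
    ringNext opp i = ringNext opp (PySem.Int.mod i 14) := by
  have h : PySem.Int.mod (i + 1) 14 = PySem.Int.mod (PySem.Int.mod i 14 + 1) 14 := by
    simp only [PySem.Int.mod_eq_emod_of_pos (show (0:Int) < 14 by norm_num)]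
    omega
  unfold ringNext
  rw [h]

theorem step13 (opp : Int) (h : opp = 0 ∨ opp = 7) :
    ∀ r : ℕ, r < 13 →
      ringNext opp ((allowedOf opp).getD r 0) = (allowedOf opp).getD ((r + 1) % 13) 0 := by
  rcases h with h | h <;> subst h <;> decide

theorem base13 (opp : Int) (h : opp = 0 ∨ opp = 7) :
    ∀ m : ℕ, m < 14 →
      ringNext opp (m : Int)
        = (allowedOf opp).getD ((if opp ≤ (m : Int) then m else m + 1) % 13) 0 := by
  rcases h with h | h <;> subst h <;> decide

theorem foldl_loop (f : Int → Int) (n : ℕ) (acc : List Int) (i : Int) :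
    (List.range n).foldl (fun st _ => (st.1 ++ [f st.2], f st.2)) (acc, i)
      = (acc ++ (List.range n).map (fun k => f^[k + 1] i), f^[n] i) := by
  induction n with
  | zero => simp
  | succ n ih =>
      simp [List.range_succ, ih, Function.iterate_succ_apply']

theorem iter_eq (opp : Int) (h : opp = 0 ∨ opp = 7) (action : Int)
    (rt : ℕ)
    (hrt : rt = if opp ≤ PySem.Int.mod action 14 then (PySem.Int.mod action 14).toNat
                else (PySem.Int.mod action 14).toNat + 1) :
    ∀ k : ℕ, (ringNext opp)^[k + 1] action = (allowedOf opp).getD ((rt + k) % 13) 0 := by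
  have hm : 0 ≤ PySem.Int.mod action 14 ∧ PySem.Int.mod action 14 < 14 := by
    rw [PySem.Int.mod_eq_emod_of_pos (show (0:Int) < 14 by norm_num)]; omega
  intro k
  induction k with
  | zero =>
      have h1 : ringNext opp action = ringNext opp (((PySem.Int.mod action 14).toNat : Int)) := by
        rw [ringNext_mod opp action]
        congr 1
        omega
      rw [Function.iterate_one, h1,
          base13 opp h (PySem.Int.mod action 14).toNat (by omega)]
      have h2 : (if opp ≤ (((PySem.Int.mod action 14).toNat : ℕ) : Int)
          then (PySem.Int.mod action 14).toNat
          else (PySem.Int.mod action 14).toNat + 1) = rt := by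
        rw [hrt]
        split_ifs with h3 h4 <;> omega
      rw [h2]
      simp
  | succ k ih =>
      have h5 : (ringNext opp)^[k + 1 + 1] action = ringNext opp ((ringNext opp)^[k + 1] action) :=
        Function.iterate_succ_apply' _ _ _
      rw [h5, ih, step13 opp h ((rt + k) % 13) (by omega)]
      congr 1
      omega

theorem sow_path_eq (board : List Int) (action player : Int) :
    sow_path board action player = sow_path_alt board action player := by
  unfold sow_path sow_path_alt
  cases hget : PySem.List.pyGet? board action with
  | none => rfl
  | some seeds =>
    simp only
    split
    · rfl
    · set opp : Int := if player == 0 then 0 else 7 with hopp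
      have hv : opp = 0 ∨ opp = 7 := by
        rw [hopp]; split <;> simp
      have hm : 0 ≤ PySem.Int.mod action 14 ∧ PySem.Int.mod action 14 < 14 := by
        rw [PySem.Int.mod_eq_emod_of_pos (show (0:Int) < 14 by norm_num)]; omega
      set m := PySem.Int.mod action 14 with hmdef
      set rt : ℕ := if opp ≤ m then m.toNat else m.toNat + 1 with hrt
      have hr0 : (m + 1) - (if opp ≤ m then (1 : Int) else 0) = (rt : Int) := by
        rw [hrt]; split_ifs <;> omega
      have key := iter_eq opp hv action rt hrt
      have hfold := foldl_loop (fun i => ringNext opp i) seeds.toNat [] action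
      have hA : ((List.range seeds.toNat).foldl
          (fun (st : List Int × Int) _ =>
            let i := nextSowIndex st.2 player
            (st.1 ++ [i], i)) ([], action)).1
          = (List.range seeds.toNat).map (fun k => (ringNext opp)^[k + 1] action) := by
        simp only [nextSowIndex_eq_ringNext, ← hopp]
        rw [hfold]
        simp
      rw [hA]
      apply List.map_congr_left
      intro k _
      rw [key k, hr0]
      have hcast : PySem.Int.mod ((rt : Int) + (k : Int)) 13
          = (((rt + k) % 13 : ℕ) : Int) := by
        have hc : ((rt : Int) + (k : Int)) = ((rt + k : ℕ) : Int) := by push_cast; ring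
        rw [hc]
        exact_mod_cast PySem.Int.mod_natCast (rt + k) 13
      rw [hcast, PySem.List.pyGetD_natCast]
      rfl

-- ===== VERDICT (by name: the statement is the Claim_ definition above) =====
theorem sow_path_spec : Claim_equal_sow_path := by
  intro board action player _ _
  unfold Spec_sow_path
  exact sow_path_eq board action player
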